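-- pv_equiv track=rewrite | github.com/u2key/eye-pattern-generator | get_bit_stream.py | get_bit_value
-- ===== SOURCE A (Python) =====
-- def get_bit_value(bit_index, bits_per_data=12):
--   bit_index_in_data_structure = bit_index % bits_per_data
--   if bit_index_in_data_structure == 0:
--     bit_value = 0
--   elif bit_index_in_data_structure >= 1 and bit_index_in_data_structure <= 8:
--     data = list(f"{int(bit_index / bits_per_data + 1) % 256:0>8b}")
--     bit_value = int(data[8-bit_index_in_data_structure])
--   elif bit_index_in_data_structure == 9:
--     data = list(f"{int(bit_index / bits_per_data + 1) % 256:0>8b}")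
--     parity = 0
--     for b in range(8):
--       parity += int(data[7-b])
--     bit_value = parity % 2
--   else:
--     bit_value = 1
--   return bit_value
-- ===== SOURCE B (Python) =====
-- def get_bit_value(bit_index, bits_per_data=12):
--     pos = bit_index % bits_per_data
--     if not (0 <= pos < 10):
--         return 1
--     byte = int(bit_index / bits_per_data + 1) % 256
--     bits = [(byte >> i) & 1 for i in range(8)]
--     frame = [0] + bits + [sum(bits) % 2]
--     return frame[pos]
-- ===== Notes on version B (the rewrite author's own statement) =====
-- stated objective: simpler
-- what changed: B replaces A's four-way per-position branch dispatch (binary string formatting, character indexing, explicit parity loop) by building the 10-entry frame header table [start, 8 data bits, parity] once with bit arithmetic and returning a single table lookup, with one guard for filler positions.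
import Mathlib
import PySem

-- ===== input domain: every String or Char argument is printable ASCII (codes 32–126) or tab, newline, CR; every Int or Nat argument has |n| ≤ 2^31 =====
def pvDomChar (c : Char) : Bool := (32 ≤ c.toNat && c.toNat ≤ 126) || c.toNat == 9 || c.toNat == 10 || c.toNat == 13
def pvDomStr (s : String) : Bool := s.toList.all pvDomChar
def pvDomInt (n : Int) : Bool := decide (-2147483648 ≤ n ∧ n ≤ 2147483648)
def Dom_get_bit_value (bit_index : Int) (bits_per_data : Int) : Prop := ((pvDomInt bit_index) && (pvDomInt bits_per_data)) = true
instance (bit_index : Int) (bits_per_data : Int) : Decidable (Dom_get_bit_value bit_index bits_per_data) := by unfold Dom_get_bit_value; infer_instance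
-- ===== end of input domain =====

-- B builds the 10-entry frame header table once and answers by one lookup, replacing A's
-- per-position branch dispatch with binary-string formatting and an explicit parity loop (objective: simpler).

-- ===== PORT A =====
-- hand port of Python's bin-digit string for f"{n:b}" (no prefix), with structural fuel;
-- fuel n+1 always suffices since the argument halves each step, so this is exact for every n
def pvBinCore : Nat → Nat → List Char
  | 0, _ => []
  | fuel+1, n => if n < 2 then [Char.ofNat (48 + n)] else pvBinCore fuel (n / 2) ++ [Char.ofNat (48 + n % 2)]

def pvBinStr (n : Nat) : List Char := pvBinCore (n + 1) n

-- f"{…:0>8b}": left-pad the binary digits with '0' to width 8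
def pvPad8 (l : List Char) : List Char := List.replicate (8 - l.length) '0' ++ l

-- int(bit_index / bits_per_data + 1) is ported as Int.tdiv (bit_index + bits_per_data) bits_per_data:
-- exact on Dom (|arguments| ≤ 2^31, so the float division and the +1 are rounding-free for truncation,
-- and trunc(a/b + 1) = trunc((a+b)/b)); the % 256 / % 2 are Python's floor-mod (PySem.Int.mod).
-- data[…] is always in range here (the padded string has length 8), so .getD is never the default.
def get_bit_value (bit_index : Int) (bits_per_data : Int) : Int :=
  let m := PySem.Int.mod bit_index bits_per_data
  if m = 0 then 0
  else if 1 ≤ m ∧ m ≤ 8 then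
    (((PySem.List.pyGet? (pvPad8 (pvBinStr (PySem.Int.mod (Int.tdiv (bit_index + bits_per_data) bits_per_data) 256).toNat)) (8 - m)).getD '0').toNat : Int) - 48
  else if m = 9 then
    PySem.Int.mod ((PySem.List.pyRange 0 8 1).foldl
      (fun p bi => p + ((((PySem.List.pyGet? (pvPad8 (pvBinStr (PySem.Int.mod (Int.tdiv (bit_index + bits_per_data) bits_per_data) 256).toNat)) (7 - bi)).getD '0').toNat : Int) - 48)) 0) 2
  else 1

-- ===== PORT B =====
-- same float-division byte expression as in Source B (see the comment above get_bit_value);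
-- byte >> i has 0 ≤ i ≤ 7 here, so i.toNat is exact; frame[pos] is in range whenever 0 ≤ pos < 10
def get_bit_value_alt (bit_index : Int) (bits_per_data : Int) : Int :=
  let pos := PySem.Int.mod bit_index bits_per_data
  if 0 ≤ pos ∧ pos < 10 then
    let bits := (PySem.List.pyRange 0 8 1).map
      (fun i => PySem.Int.band ((PySem.Int.mod (Int.tdiv (bit_index + bits_per_data) bits_per_data) 256) >>> i.toNat) 1)
    PySem.List.pyGetD (0 :: bits ++ [PySem.Int.mod (bits.foldl (· + ·) 0) 2]) pos 0
  else 1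

-- ===== PRECONDITION & SPEC =====
-- Pre_ excludes only bits_per_data = 0, on which Python A raises ZeroDivisionError
def Pre_get_bit_value (bit_index : Int) (bits_per_data : Int) : Prop := bits_per_data ≠ 0
instance (bit_index : Int) (bits_per_data : Int) : Decidable (Pre_get_bit_value bit_index bits_per_data) := by unfold Pre_get_bit_value; infer_instance
def pvWitness_get_bit_value : Int × Int := (25, 12)

def Spec_get_bit_value (bit_index : Int) (bits_per_data : Int) (out : Int) : Prop := out = get_bit_value_alt bit_index bits_per_data
instance (bit_index : Int) (bits_per_data : Int) (out : Int) : Decidable (Spec_get_bit_value bit_index bits_per_data out) := by unfold Spec_get_bit_value; infer_instance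

-- ===== CLAIM (what is proved, stated in full; the proofs are below) =====
def Claim_equal_get_bit_value : Prop := ∀ (bit_index : Int) (bits_per_data : Int), Dom_get_bit_value bit_index bits_per_data → Pre_get_bit_value bit_index bits_per_data → Spec_get_bit_value bit_index bits_per_data (get_bit_value bit_index bits_per_data)

-- ===== LEMMAS AND PROOFS =====

-- for every byte value k < 256 and every in-frame position j < 10, A's branch value equals B's table lookup
set_option maxRecDepth 40000 in
lemma pvKey : ∀ k : Nat, k < 256 → ∀ j : Nat, j < 10 →
    (if (j : Int) = 0 then (0 : Int)
     else if 1 ≤ (j : Int) ∧ (j : Int) ≤ 8 then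
       (((PySem.List.pyGet? (pvPad8 (pvBinStr ((k : Int)).toNat)) (8 - (j : Int))).getD '0').toNat : Int) - 48
     else if (j : Int) = 9 then
       PySem.Int.mod ((PySem.List.pyRange 0 8 1).foldl
         (fun p bi => p + ((((PySem.List.pyGet? (pvPad8 (pvBinStr ((k : Int)).toNat)) (7 - bi)).getD '0').toNat : Int) - 48)) 0) 2
     else 1)
    = PySem.List.pyGetD
        (0 :: ((PySem.List.pyRange 0 8 1).map (fun i => PySem.Int.band ((k : Int) >>> i.toNat) 1)) ++
          [PySem.Int.mod (((PySem.List.pyRange 0 8 1).map (fun i => PySem.Int.band ((k : Int) >>> i.toNat) 1)).foldl (· + ·) 0) 2])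
        (j : Int) 0 := by decide

-- ===== VERDICT (by name: the statement is the Claim_ definition above) =====
theorem get_bit_value_spec : Claim_equal_get_bit_value := by
  intro a b _ hb
  unfold Spec_get_bit_value
  simp only [get_bit_value, get_bit_value_alt]
  set m := PySem.Int.mod a b with hm
  by_cases h : 0 ≤ m ∧ m < 10
  · obtain ⟨h0, h9⟩ := h
    have hkn : 0 ≤ PySem.Int.mod (Int.tdiv (a + b) b) 256 :=
      PySem.Int.mod_nonneg _ (by norm_num)
    have hkl : PySem.Int.mod (Int.tdiv (a + b) b) 256 < 256 :=
      PySem.Int.mod_lt _ (by norm_num)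
    have hkeq : PySem.Int.mod (Int.tdiv (a + b) b) 256
        = ((PySem.Int.mod (Int.tdiv (a + b) b) 256).toNat : Int) :=
      (Int.toNat_of_nonneg hkn).symm
    have hmeq : m = ((m.toNat : Nat) : Int) := (Int.toNat_of_nonneg h0).symm
    rw [hkeq, hmeq]
    rw [if_pos (show (0:Int) ≤ ((m.toNat : Nat) : Int) ∧ ((m.toNat : Nat) : Int) < 10 by omega)]
    exact pvKey ((PySem.Int.mod (Int.tdiv (a + b) b) 256).toNat) (by omega) m.toNat (by omega)
  · have c1 : ¬ (m = 0) := by omega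
    have c2 : ¬ (1 ≤ m ∧ m ≤ 8) := by omega
    have c3 : ¬ (m = 9) := by omega
    have c4 : ¬ (0 ≤ m ∧ m < 10) := by omega
    simp only [if_neg c1, if_neg c2, if_neg c3, if_neg c4]
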